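-- pv_equiv track=rewrite | github.com/ckf42/codelib | py/personalPylib.py | stringToPhoneNum
-- ===== SOURCE A (Python) =====
-- def stringToPhoneNum(s: str, asMultiTap: bool = False) -> str:
--     """
--     Translate a string to the corresponding number sequence on phone input
--     ---
--     Parameter:
--         s:
--             Type: str
--             The input string
--         asMultiTap:
--             Type: bool
--             Default: False
--             Determine if Multi-tap typing should be used instead of T9
--     ---
--     Return:
--         A string where the lower-case order are translated to number as in phone input
--         If a character is not a lower-case letter, it is be kept in the string
--     """
--     keyLists = ('abc', 'def', 'ghi', 'jkl', 'mno', 'pqrs', 'tuv', 'wxyz')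
--     # TODO: better construct method?
--     keyDict = {}
--     for idx, tok in enumerate(keyLists):
--         keyDict.update(
--             zip(tok,
--                 (str(idx + 2) * k
--                  for k in (range(1, len(tok) + 1)
--                            if asMultiTap
--                            else (1, ) * len(tok))))
--         )
--     return ''.join([keyDict.get(i, i) for i in s])
-- ===== SOURCE B (Python) =====
-- def stringToPhoneNum(s: str, asMultiTap: bool = False) -> str:
--     # Pure arithmetic on character codes: no keypad table at all.
--     out = []
--     for c in s:
--         o = ord(c) - 97
--         if 0 <= o <= 25:
--             if o < 15:
--                 d, p = 2 + o // 3, o % 3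
--             elif o < 19:
--                 d, p = 7, o - 15
--             elif o < 22:
--                 d, p = 8, o - 19
--             else:
--                 d, p = 9, o - 22
--             out.append(str(d) * (p + 1 if asMultiTap else 1))
--         else:
--             out.append(c)
--     return ''.join(out)
-- ===== Notes on version B (the rewrite author's own statement) =====
-- stated objective: alternative
-- what changed: Replaces A's keypad table (keyDict built from keyLists) with pure arithmetic on character codes: the digit and repeat count are computed from ord(c)-97 by interval formulas, no table or group scan exists in B.
import Mathlib
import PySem

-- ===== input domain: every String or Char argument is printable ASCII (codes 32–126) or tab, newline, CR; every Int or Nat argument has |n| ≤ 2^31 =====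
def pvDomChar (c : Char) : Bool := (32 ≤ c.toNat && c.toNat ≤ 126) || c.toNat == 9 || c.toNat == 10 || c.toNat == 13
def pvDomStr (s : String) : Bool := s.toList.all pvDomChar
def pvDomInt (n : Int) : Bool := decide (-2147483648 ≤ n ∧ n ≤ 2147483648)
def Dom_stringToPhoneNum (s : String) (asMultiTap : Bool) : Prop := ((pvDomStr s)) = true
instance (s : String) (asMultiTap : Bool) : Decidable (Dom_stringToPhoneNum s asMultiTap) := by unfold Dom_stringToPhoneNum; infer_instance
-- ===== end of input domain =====

-- B replaces A's keypad table with interval arithmetic on character codes (alternative algorithm, no table).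

-- ===== PORT A =====
-- keyLists = ('abc', 'def', 'ghi', 'jkl', 'mno', 'pqrs', 'tuv', 'wxyz')
def pvKeyLists : List (List Char) :=
  [['a','b','c'], ['d','e','f'], ['g','h','i'], ['j','k','l'], ['m','n','o'],
   ['p','q','r','s'], ['t','u','v'], ['w','x','y','z']]

-- keyDict built by the enumerate/update loop; 'str(idx+2) * k' is flatten of k copies
def pvA_keyDict (asMultiTap : Bool) : PySem.Dict Char (List Char) :=
  (PySem.List.enumerate pvKeyLists 0).foldl
    (fun d p =>
      PySem.Dict.update d
        (p.2.zip
          ((if asMultiTap then PySem.List.pyRange 1 ((p.2.length : Int) + 1) 1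
            else List.replicate p.2.length (1 : Int)).map
            (fun k => (List.replicate k.toNat (PySem.Int.toChars (p.1 + 2))).flatten))))
    PySem.Dict.empty

-- ''.join([keyDict.get(i, i) for i in s])
def stringToPhoneNum (s : String) (asMultiTap : Bool) : String :=
  String.ofList ((s.toList.map (fun c => (pvA_keyDict asMultiTap).getD c [c])).flatten)

-- ===== PORT B =====
-- per-character body of B's loop: o = ord(c) - 97, then interval arithmetic
def pvB_char (m : Bool) (c : Char) : List Char :=
  let o : Int := (c.toNat : Int) - 97
  if 0 ≤ o ∧ o ≤ 25 then
    let dp : Int × Int :=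
      if o < 15 then (2 + PySem.Int.floordiv o 3, PySem.Int.mod o 3)
      else if o < 19 then (7, o - 15)
      else if o < 22 then (8, o - 19)
      else (9, o - 22)
    (List.replicate (if m then dp.2 + 1 else 1).toNat (PySem.Int.toChars dp.1)).flatten
  else [c]

def stringToPhoneNum_alt (s : String) (asMultiTap : Bool) : String :=
  String.ofList ((s.toList.map (pvB_char asMultiTap)).flatten)

-- ===== PRECONDITION & SPEC =====
def Spec_stringToPhoneNum (s : String) (asMultiTap : Bool) (out : String) : Prop := out = stringToPhoneNum_alt s asMultiTap
instance (s : String) (asMultiTap : Bool) (out : String) : Decidable (Spec_stringToPhoneNum s asMultiTap out) := by unfold Spec_stringToPhoneNum; infer_instance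

-- ===== CLAIM (what is proved, stated in full; the proofs are below) =====
def Claim_equal_stringToPhoneNum : Prop := ∀ (s : String) (asMultiTap : Bool), Dom_stringToPhoneNum s asMultiTap → Spec_stringToPhoneNum s asMultiTap (stringToPhoneNum s asMultiTap)

-- ===== LEMMAS AND PROOFS =====

-- per-character agreement on every Dom character (codes < 128), checked exhaustively
set_option maxRecDepth 4000 in
theorem pvPerChar : ∀ (m : Bool) (n : Fin 128),
    (pvA_keyDict m).getD (Char.ofNat n.val) [Char.ofNat n.val]
      = pvB_char m (Char.ofNat n.val) := by
  decide

theorem pvPerChar' (m : Bool) (c : Char) (h : pvDomChar c = true) :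
    (pvA_keyDict m).getD c [c] = pvB_char m c := by
  have hlt : c.toNat < 128 := by
    simp only [pvDomChar, Bool.or_eq_true, Bool.and_eq_true, decide_eq_true_eq, beq_iff_eq] at h
    omega
  have hc : Char.ofNat c.toNat = c := Char.ofNat_toNat c
  have := pvPerChar m ⟨c.toNat, hlt⟩
  simpa [hc] using this

-- ===== VERDICT (by name: the statement is the Claim_ definition above) =====
theorem stringToPhoneNum_spec : Claim_equal_stringToPhoneNum := by
  intro s m hdom
  unfold Spec_stringToPhoneNum stringToPhoneNum stringToPhoneNum_alt
  have hall : ∀ c ∈ s.toList, pvDomChar c = true := by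
    simpa [Dom_stringToPhoneNum, pvDomStr, List.all_eq_true] using hdom
  rw [List.map_congr_left (fun c hc => pvPerChar' m c (hall c hc))]
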